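-- pv_equiv track=rewrite | github.com/davidx345/SchemaSage | services/code-generation/core/real_time_collaboration/conflict_resolver.py | _constraints_conflict
-- ===== SOURCE A (Python) =====
-- from typing import Dict, List, Optional, Any, Tuple, Set
--
-- def _constraints_conflict(constraints1: List[str], constraints2: List[str]) -> bool:
--     """Check if two sets of constraints conflict"""
--     # Simple check for mutually exclusive constraints
--     exclusive_pairs = {
--         ("nullable", "not_null"),
--         ("unique", "non_unique"),
--         ("primary_key", "foreign_key")
--     }
--
--     for c1 in constraints1:
--         for c2 in constraints2:
--             if (c1, c2) in exclusive_pairs or (c2, c1) in exclusive_pairs: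
--                 return True
--
--     return False
-- ===== SOURCE B (Python) =====
-- from typing import Dict, List, Optional, Any, Tuple, Set
--
-- _EXCLUSIVE_PARTNER = {
--     "nullable": "not_null",
--     "not_null": "nullable",
--     "unique": "non_unique",
--     "non_unique": "unique",
--     "primary_key": "foreign_key",
--     "foreign_key": "primary_key",
-- }
--
-- def _constraints_conflict(constraints1: List[str], constraints2: List[str]) -> bool:
--     """Check if two sets of constraints conflict"""
--     present2 = set(constraints2)
--     return any(_EXCLUSIVE_PARTNER.get(c) in present2 for c in constraints1)
-- ===== Notes on version B (the rewrite author's own statement) =====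
-- stated objective: faster
-- what changed: Replaced the nested scan over all (c1,c2) pairs by a precomputed partner dictionary plus a hash set of constraints2, checking each c1's exclusive partner for membership in one pass.
import Mathlib
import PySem

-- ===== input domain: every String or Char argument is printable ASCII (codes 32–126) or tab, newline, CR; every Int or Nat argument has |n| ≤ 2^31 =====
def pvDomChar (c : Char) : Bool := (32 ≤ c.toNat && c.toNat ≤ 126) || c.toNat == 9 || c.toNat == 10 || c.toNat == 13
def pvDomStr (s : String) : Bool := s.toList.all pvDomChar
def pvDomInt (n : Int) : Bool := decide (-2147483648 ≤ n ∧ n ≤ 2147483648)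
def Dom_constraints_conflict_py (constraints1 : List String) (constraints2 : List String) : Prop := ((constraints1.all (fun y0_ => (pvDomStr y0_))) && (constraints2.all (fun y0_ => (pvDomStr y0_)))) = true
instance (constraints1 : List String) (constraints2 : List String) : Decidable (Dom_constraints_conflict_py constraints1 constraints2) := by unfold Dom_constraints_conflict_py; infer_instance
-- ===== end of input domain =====

-- B replaces A's nested pair scan with a precomputed partner dictionary and a set of
-- constraints2, checking each constraint's exclusive partner for membership (O(n+m) vs O(n*m)).

-- ===== PORT A =====
-- exclusive_pairs: Python set of tuples, built with PySem.Set
def pvExclusivePairs : PySem.Set (String × String) :=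
  PySem.Set.ofList [("nullable", "not_null"), ("unique", "non_unique"), ("primary_key", "foreign_key")]

-- nested for-loops with early 'return True' = List.any over List.any
def constraints_conflict_py (constraints1 : List String) (constraints2 : List String) : Bool :=
  constraints1.any (fun c1 =>
    constraints2.any (fun c2 =>
      PySem.Set.contains pvExclusivePairs (c1, c2) || PySem.Set.contains pvExclusivePairs (c2, c1)))

-- ===== PORT B =====
-- _EXCLUSIVE_PARTNER module-level dict
def pvExclusivePartner : PySem.Dict String String :=
  PySem.Dict.ofList [("nullable", "not_null"), ("not_null", "nullable"),
                     ("unique", "non_unique"), ("non_unique", "unique"),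
                     ("primary_key", "foreign_key"), ("foreign_key", "primary_key")]

-- present2 = set(constraints2); any(_EXCLUSIVE_PARTNER.get(c) in present2 for c in constraints1)
-- (.get returning None is never a member of a set of strings, hence the none ⇒ false branch)
def constraints_conflict_py_alt (constraints1 : List String) (constraints2 : List String) : Bool :=
  let present2 : PySem.Set String := PySem.Set.ofList constraints2
  constraints1.any (fun c =>
    match pvExclusivePartner.get? c with
    | some p => PySem.Set.contains present2 p
    | none => false)

-- ===== PRECONDITION & SPEC =====
def Spec_constraints_conflict_py (constraints1 : List String) (constraints2 : List String) (out : Bool) : Prop := out = constraints_conflict_py_alt constraints1 constraints2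
instance (constraints1 : List String) (constraints2 : List String) (out : Bool) : Decidable (Spec_constraints_conflict_py constraints1 constraints2 out) := by unfold Spec_constraints_conflict_py; infer_instance

-- ===== CLAIM (what is proved, stated in full; the proofs are below) =====
def Claim_equal_constraints_conflict_py : Prop := ∀ (constraints1 : List String) (constraints2 : List String), Dom_constraints_conflict_py constraints1 constraints2 → Spec_constraints_conflict_py constraints1 constraints2 (constraints_conflict_py constraints1 constraints2)

-- ===== LEMMAS AND PROOFS =====

-- the literal Python set reduces to its (duplicate-free) element list
lemma pv_pairs_eq : pvExclusivePairs =
    [("nullable", "not_null"), ("unique", "non_unique"), ("primary_key", "foreign_key")] := by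
  decide

-- the literal Python dict reduces to its association list
lemma pv_dict_eq : pvExclusivePartner =
    PySem.Dict.mk [("nullable", "not_null"), ("not_null", "nullable"),
                   ("unique", "non_unique"), ("non_unique", "unique"),
                   ("primary_key", "foreign_key"), ("foreign_key", "primary_key")] := by
  decide

-- A's pair test, pointwise, equals "c2 is c1's partner in the dictionary"
set_option maxRecDepth 4000 in
lemma pv_check_eq (c1 c2 : String) :
    (PySem.Set.contains pvExclusivePairs (c1, c2) || PySem.Set.contains pvExclusivePairs (c2, c1)) =
    (match pvExclusivePartner.get? c1 with
     | some p => p == c2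
     | none => false) := by
  by_cases h1 : c1 = "nullable" <;>
  by_cases h2 : c1 = "not_null" <;>
  by_cases h3 : c1 = "unique" <;>
  by_cases h4 : c1 = "non_unique" <;>
  by_cases h5 : c1 = "primary_key" <;>
  by_cases h6 : c1 = "foreign_key" <;>
  simp_all [pv_pairs_eq, pv_dict_eq, PySem.Set.contains, PySem.Dict.get?_mk_cons,
    List.contains_eq_mem, Prod.ext_iff] <;>
  simp_all [eq_comm, PySem.Dict.get?] <;>
  simp [BEq.comm] <;> (rw [Bool.eq_iff_iff]; simp)

-- membership in set(constraints2) is membership in the list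
lemma pv_set_contains (p : String) (l : List String) :
    PySem.Set.contains (PySem.Set.ofList l) p = l.contains p := by
  simp [PySem.Set.contains, List.contains_eq_mem, PySem.Set.mem_ofList]

-- inner loop of A, for a fixed c1, equals B's single dictionary lookup + membership test
lemma pv_inner_eq (c1 : String) (l2 : List String) :
    l2.any (fun c2 =>
      PySem.Set.contains pvExclusivePairs (c1, c2) || PySem.Set.contains pvExclusivePairs (c2, c1)) =
    (match pvExclusivePartner.get? c1 with
     | some p => PySem.Set.contains (PySem.Set.ofList l2) p
     | none => false) := by
  have h : ∀ c2, (PySem.Set.contains pvExclusivePairs (c1, c2) || PySem.Set.contains pvExclusivePairs (c2, c1)) =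
      (match pvExclusivePartner.get? c1 with | some p => p == c2 | none => false) := pv_check_eq c1
  rw [funext h]
  cases hg : pvExclusivePartner.get? c1 with
  | none => simp
  | some p =>
    simp only [pv_set_contains]
    rw [List.any_beq]

-- ===== VERDICT (by name: the statement is the Claim_ definition above) =====
theorem constraints_conflict_py_spec : Claim_equal_constraints_conflict_py := by
  intro constraints1 constraints2 _
  unfold Spec_constraints_conflict_py constraints_conflict_py constraints_conflict_py_alt
  exact funext (fun c1 => pv_inner_eq c1 constraints2) ▸ rfl
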